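-- pv_equiv track=rewrite | github.com/CaptainSora/Python-Project-Euler | PE051.py | count
-- ===== SOURCE A (Python) =====
-- searchlen = 8
--
-- def count(numlist):
--     indexarray = []
--     for a in range(10 - searchlen + 1):
--         indexes = []
--         for b in range(len(numlist)):
--             if int(numlist[b]) == a:
--                 indexes.append(b)
--         indexarray.append(indexes)
--     return indexarray
-- ===== SOURCE B (Python) =====
-- def count(numlist):
--     zeros, ones, twos = [], [], []
--     for i, s in enumerate(numlist):
--         v = int(s)
--         if v == 0:
--             zeros.append(i)
--         elif v == 1:
--             ones.append(i)
--         elif v == 2: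
--             twos.append(i)
--     return [zeros, ones, twos]
-- ===== Notes on version B (the rewrite author's own statement) =====
-- stated objective: simpler
-- what changed: Replaces A's three separate scans of the list (one per digit value 0..2) with a single enumerate pass that dispatches each index into the matching bucket.
import Mathlib
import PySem

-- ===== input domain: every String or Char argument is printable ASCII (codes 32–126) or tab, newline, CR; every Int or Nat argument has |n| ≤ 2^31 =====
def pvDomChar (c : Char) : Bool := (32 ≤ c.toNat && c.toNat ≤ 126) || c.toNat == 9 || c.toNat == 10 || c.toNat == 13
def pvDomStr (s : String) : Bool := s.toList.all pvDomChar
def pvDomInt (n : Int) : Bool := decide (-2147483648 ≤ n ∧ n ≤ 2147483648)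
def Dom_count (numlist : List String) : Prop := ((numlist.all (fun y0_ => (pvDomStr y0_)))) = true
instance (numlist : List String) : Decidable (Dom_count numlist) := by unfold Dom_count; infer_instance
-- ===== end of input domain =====

-- B replaces A's three separate scans (one per digit value 0..2) with a single
-- enumerate pass dispatching each index into the matching bucket; same return value.


-- ===== PORT A =====
def searchlen : Int := 8

def count (numlist : List String) : List (List Int) :=
  (PySem.List.pyRange 0 (10 - searchlen + 1) 1).foldl (fun indexarray a =>
    indexarray ++
      [(PySem.List.pyRange 0 (numlist.length : Int) 1).foldl (fun indexes b =>
        if (PySem.Int.ofStr? (PySem.List.pyGetD numlist b "")).getD 0 = a then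
          indexes ++ [b]
        else indexes) []]) []

-- ===== PORT B =====
def count_alt (numlist : List String) : List (List Int) :=
  let t := (PySem.List.enumerate numlist 0).foldl
    (fun (t : List Int × List Int × List Int) p =>
      let v := (PySem.Int.ofStr? p.2).getD 0
      if v = 0 then (t.1 ++ [p.1], t.2.1, t.2.2)
      else if v = 1 then (t.1, t.2.1 ++ [p.1], t.2.2)
      else if v = 2 then (t.1, t.2.1, t.2.2 ++ [p.1])
      else t)
    ([], [], [])
  [t.1, t.2.1, t.2.2]

-- ===== PRECONDITION & SPEC =====
-- Pre_ excludes exactly the inputs where int() raises ValueError in A (and in B).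
def Pre_count (numlist : List String) : Prop :=
  (numlist.all (fun s => (PySem.Int.ofStr? s).isSome)) = true
instance (numlist : List String) : Decidable (Pre_count numlist) := by unfold Pre_count; infer_instance
def pvWitness_count : List String := ["0", "2", "-3", " 1 "]

def Spec_count (numlist : List String) (out : List (List Int)) : Prop := out = count_alt numlist
instance (numlist : List String) (out : List (List Int)) : Decidable (Spec_count numlist out) := by unfold Spec_count; infer_instance

-- ===== CLAIM (what is proved, stated in full; the proofs are below) =====
def Claim_equal_count : Prop := ∀ (numlist : List String), Dom_count numlist → Pre_count numlist → Spec_count numlist (count numlist)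

-- ===== LEMMAS AND PROOFS =====

-- the value parsed at an entry, shared vocabulary of the proofs
def pvVal (s : String) : Int := (PySem.Int.ofStr? s).getD 0

-- indices (first components) of the enumerated entries whose parsed value is a
def pvSel (a : Int) (l : List (Int × String)) : List Int :=
  (l.filter (fun p => decide (pvVal p.2 = a))).map (·.1)

-- B's single fold computes the three selections at once
theorem Bfold_eq (l : List (Int × String)) (x y z : List Int) :
    l.foldl (fun (t : List Int × List Int × List Int) p =>
      let v := (PySem.Int.ofStr? p.2).getD 0
      if v = 0 then (t.1 ++ [p.1], t.2.1, t.2.2)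
      else if v = 1 then (t.1, t.2.1 ++ [p.1], t.2.2)
      else if v = 2 then (t.1, t.2.1, t.2.2 ++ [p.1])
      else t) (x, y, z)
    = (x ++ pvSel 0 l, y ++ pvSel 1 l, z ++ pvSel 2 l) := by
  induction l generalizing x y z with
  | nil => simp [pvSel]
  | cons p l ih =>
    simp only [List.foldl_cons]
    by_cases h0 : pvVal p.2 = 0
    · simp [pvVal] at h0
      simp [h0, ih, pvSel, pvVal]
    · by_cases h1 : pvVal p.2 = 1
      · simp [pvVal] at h1
        simp [h1, ih, pvSel, pvVal]
      · by_cases h2 : pvVal p.2 = 2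
        · simp [pvVal] at h2
          simp [h2, ih, pvSel, pvVal]
        · simp [pvVal] at h0 h1 h2
          simp [h0, h1, h2, ih, pvSel, pvVal]

-- A's inner loop over range(len(numlist)) equals the selection over enumerate
theorem inner_eq_sel (numlist : List String) (a : Int) :
    (PySem.List.pyRange 0 (numlist.length : Int) 1).foldl (fun indexes b =>
        if (PySem.Int.ofStr? (PySem.List.pyGetD numlist b "")).getD 0 = a then
          indexes ++ [b]
        else indexes) []
    = pvSel a (PySem.List.enumerate numlist 0) := by
  rw [PySem.List.foldl_append_ite_eq_filter]
  rw [PySem.List.enumerate_eq_map_pyRange numlist ""]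
  unfold pvSel
  rw [List.filter_map, List.map_map]
  simp only [pvVal, Function.comp_def, List.map_id_fun', id, List.nil_append]
  exact List.filter_congr (fun x _ => by simp)

theorem count_spec : Claim_equal_count := by
  intro numlist _ _
  unfold Spec_count count count_alt searchlen
  have houter : PySem.List.pyRange 0 (10 - (8:Int) + 1) 1 = [0, 1, 2] := by decide
  rw [houter]
  simp only [List.foldl_cons, List.foldl_nil, List.nil_append]
  rw [Bfold_eq]
  simp [inner_eq_sel]
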